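-- pv_equiv track=rewrite | github.com/adityapgupta/Numerical_Methods | Problem_Set_3/Q2(backward).py | delta_values
-- ===== SOURCE A (Python) =====
-- def delta_values(A):
--     values = []
--     values.append(A)
--
--     for i in range(len(A)-1):
--         temp = []
--         for j in range(len(A)-i-1):
--             value = values[i][j]-values[i][j-1]
--             temp.append(value)
--         values.append(temp)
--
--     firsts = [x[0] for x in values]
--     return firsts
-- ===== SOURCE B (Python) =====
-- def delta_values(A):
--     if len(A) <= 1:
--         return [A[0]]
--     nxt = [A[j] - A[j-1] for j in range(len(A) - 1)]
--     return [A[0]] + delta_values(nxt)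
-- ===== Notes on version B (the rewrite author's own statement) =====
-- stated objective: simpler
-- what changed: Replaced the outer loop that indexes into a stored list of all difference rows (and the final first-element comprehension) by a direct recursion: emit the head, recurse on the single next difference row; no table of rows is kept.
import Mathlib
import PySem

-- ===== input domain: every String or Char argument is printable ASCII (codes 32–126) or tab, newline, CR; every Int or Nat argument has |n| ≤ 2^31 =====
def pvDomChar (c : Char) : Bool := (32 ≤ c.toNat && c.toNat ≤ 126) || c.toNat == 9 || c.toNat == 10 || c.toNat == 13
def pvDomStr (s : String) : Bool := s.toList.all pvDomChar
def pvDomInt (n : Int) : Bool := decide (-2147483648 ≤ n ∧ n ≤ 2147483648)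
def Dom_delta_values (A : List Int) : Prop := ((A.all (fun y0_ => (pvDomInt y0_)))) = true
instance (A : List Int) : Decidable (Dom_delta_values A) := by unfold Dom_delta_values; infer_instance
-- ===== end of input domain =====

-- B replaces A's stored table of difference rows by a direct recursion on the single next row (objective: simpler).

-- ===== PORT A =====
-- literal port of A: build the list 'values' of all difference rows, then take each row's first element
def delta_values (A : List Int) : List Int :=
  let values : List (List Int) := [] ++ [A]
  let values :=
    (PySem.List.pyRange 0 ((A.length : Int) - 1) 1).foldl
      (fun values i =>
        let temp :=
          (PySem.List.pyRange 0 ((A.length : Int) - i - 1) 1).foldl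
            (fun temp j =>
              temp ++ [PySem.List.pyGetD (PySem.List.pyGetD values i []) j 0 -
                       PySem.List.pyGetD (PySem.List.pyGetD values i []) (j - 1) 0])
            []
        values ++ [temp])
      values
  values.map (fun x => PySem.List.pyGetD x 0 0)

-- ===== PORT B =====
-- literal port of B: emit A[0], recurse on the next difference row
def delta_values_alt (A : List Int) : List Int :=
  if A.length ≤ 1 then [PySem.List.pyGetD A 0 0]
  else
    PySem.List.pyGetD A 0 0 ::
      delta_values_alt
        ((PySem.List.pyRange 0 ((A.length : Int) - 1) 1).map
          (fun j => PySem.List.pyGetD A j 0 - PySem.List.pyGetD A (j - 1) 0))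
termination_by A.length
decreasing_by
  simp [PySem.List.length_pyRange_one]
  omega

-- ===== PRECONDITION & SPEC =====
-- Pre_ excludes only the empty list, on which both Pythons raise IndexError when taking the first element.
def Pre_delta_values (A : List Int) : Prop := A ≠ []
instance (A : List Int) : Decidable (Pre_delta_values A) := by unfold Pre_delta_values; infer_instance
def pvWitness_delta_values : List Int := [3, 1, 4]

def Spec_delta_values (A : List Int) (out : List Int) : Prop := out = delta_values_alt A
instance (A : List Int) (out : List Int) : Decidable (Spec_delta_values A out) := by unfold Spec_delta_values; infer_instance

-- ===== CLAIM (what is proved, stated in full; the proofs are below) =====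
def Claim_equal_delta_values : Prop := ∀ (A : List Int), Dom_delta_values A → Pre_delta_values A → Spec_delta_values A (delta_values A)

-- ===== LEMMAS AND PROOFS =====

-- the "next difference row" operator both ports compute
def dstep (r : List Int) : List Int :=
  (PySem.List.pyRange 0 ((r.length : Int) - 1) 1).map
    (fun j => PySem.List.pyGetD r j 0 - PySem.List.pyGetD r (j - 1) 0)

theorem length_dstep (r : List Int) : (dstep r).length = r.length - 1 := by
  simp [dstep, PySem.List.length_pyRange_one]

theorem length_dstep_iterate (t : Nat) (r : List Int) :
    (dstep^[t] r).length = r.length - t := by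
  induction t generalizing r with
  | zero => simp
  | succ t ih =>
    rw [Function.iterate_succ_apply, ih, length_dstep]
    omega

-- B-port characterisation: first elements of the iterated difference rows
theorem alt_char : ∀ (n : Nat) (A : List Int), A.length = n → A ≠ [] →
    delta_values_alt A =
      (List.range A.length).map (fun t => PySem.List.pyGetD (dstep^[t] A) 0 0) := by
  intro n
  induction n using Nat.strong_induction_on with
  | _ n ih =>
    intro A hn hne
    rw [delta_values_alt]
    by_cases h1 : A.length ≤ 1
    · have hl1 : A.length = 1 := by
        have := List.length_pos_of_ne_nil hne
        omega
      simp [hl1]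
    · simp only [h1, if_false]
      have harg :
          ((PySem.List.pyRange 0 ((A.length : Int) - 1) 1).map
            (fun j => PySem.List.pyGetD A j 0 - PySem.List.pyGetD A (j - 1) 0)) = dstep A := rfl
      rw [harg]
      have hlen : (dstep A).length = A.length - 1 := length_dstep A
      have hdne : dstep A ≠ [] := by
        intro h
        rw [h] at hlen
        simp at hlen
        omega
      rw [ih (A.length - 1) (by omega) (dstep A) (by omega) hdne, hlen]
      have hsp : A.length = (A.length - 1) + 1 := by omega
      conv_rhs => rw [hsp, List.range_succ_eq_map]
      simp [Function.iterate_succ_apply, Function.comp]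

-- A's outer-loop invariant: after k steps the table holds the first k+1 iterated rows
theorem foldA (A : List Int) (hne : A ≠ []) (k : Nat) (hk : k ≤ A.length - 1) :
    (PySem.List.pyRange 0 (k : Int) 1).foldl
      (fun values i =>
        let temp :=
          (PySem.List.pyRange 0 ((A.length : Int) - i - 1) 1).foldl
            (fun temp j =>
              temp ++ [PySem.List.pyGetD (PySem.List.pyGetD values i []) j 0 -
                       PySem.List.pyGetD (PySem.List.pyGetD values i []) (j - 1) 0])
            []
        values ++ [temp])
      ([] ++ [A]) =
    (List.range (k + 1)).map (fun t => dstep^[t] A) := by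
  have hA : 1 ≤ A.length := List.length_pos_of_ne_nil hne
  induction k with
  | zero => simp [PySem.List.pyRange_one_eq_nil]
  | succ k ihk =>
    have hk' : k ≤ A.length - 1 := by omega
    have hstep : (0 : Int) ≤ (k : Int) := by positivity
    rw [show ((k + 1 : Nat) : Int) = (k : Int) + 1 by push_cast; ring,
        PySem.List.pyRange_one_succ_right hstep, List.foldl_append, ihk hk']
    simp only [List.foldl_cons, List.foldl_nil]
    -- the row read at index k is dstep^[k] A
    have hread :
        PySem.List.pyGetD ((List.range (k + 1)).map (fun t => dstep^[t] A)) (k : Int) [] =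
          dstep^[k] A := by
      rw [PySem.List.pyGetD_natCast, List.getD_eq_getElem _ _ (by simp),
          List.getElem_map, List.getElem_range]
    rw [hread]
    have hlen : (dstep^[k] A).length = A.length - k := length_dstep_iterate k A
    have hbound : ((A.length : Int) - (k : Int) - 1) = (((dstep^[k] A).length : Int) - 1) := by
      rw [hlen]; omega
    rw [hbound, PySem.List.foldl_append_singleton_eq_map]
    conv_rhs => rw [List.range_succ]
    rw [List.map_append]
    congr 1
    simp only [List.map_cons, List.map_nil]
    congr 1
    rw [Function.iterate_succ_apply']
    rfl

theorem portA_char (A : List Int) (hne : A ≠ []) :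
    delta_values A =
      (List.range A.length).map (fun t => PySem.List.pyGetD (dstep^[t] A) 0 0) := by
  have hA : 1 ≤ A.length := List.length_pos_of_ne_nil hne
  unfold delta_values
  dsimp only
  have hcast : ((A.length : Int) - 1) = ((A.length - 1 : Nat) : Int) := by omega
  rw [hcast, foldA A hne (A.length - 1) le_rfl, List.map_map]
  have hsp : A.length - 1 + 1 = A.length := by omega
  rw [hsp]
  rfl

-- ===== VERDICT (by name: the statement is the Claim_ definition above) =====
theorem delta_values_spec : Claim_equal_delta_values := by
  intro A _ hne
  unfold Spec_delta_values
  rw [portA_char A hne, alt_char A.length A rfl hne]
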